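-- pv_equiv track=rewrite | github.com/BigPolandBro/lessons | tests_25_array_chunk.py | check_array_chunk
-- ===== SOURCE A (Python) =====
-- def check_array_chunk(M, iN):
--     if len(M) == 0:
--         return iN == 0
--     if iN < 0 or iN >= len(M):
--         return False
--     for i in range(0, len(M)):
--         if i < iN and M[i] >= M[iN]:
--             return False
--         if i > iN and M[i] <= M[iN]:
--             return False
--     return True
-- ===== SOURCE B (Python) =====
-- def check_array_chunk(M, iN):
--     if len(M) == 0:
--         return iN == 0
--     if iN < 0 or iN >= len(M):
--         return False
--     p = M[iN]
--     return [x for x in M if x < p] == M[:iN] and [x for x in M if x > p] == M[iN + 1:]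
-- ===== Notes on version B (the rewrite author's own statement) =====
-- stated objective: alternative
-- what changed: Instead of walking indices and testing each element against the pivot by position, B partitions M by filtering the elements strictly below and strictly above the pivot and checks that these two filtered lists are exactly the left and right slices of M around iN.
import Mathlib
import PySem

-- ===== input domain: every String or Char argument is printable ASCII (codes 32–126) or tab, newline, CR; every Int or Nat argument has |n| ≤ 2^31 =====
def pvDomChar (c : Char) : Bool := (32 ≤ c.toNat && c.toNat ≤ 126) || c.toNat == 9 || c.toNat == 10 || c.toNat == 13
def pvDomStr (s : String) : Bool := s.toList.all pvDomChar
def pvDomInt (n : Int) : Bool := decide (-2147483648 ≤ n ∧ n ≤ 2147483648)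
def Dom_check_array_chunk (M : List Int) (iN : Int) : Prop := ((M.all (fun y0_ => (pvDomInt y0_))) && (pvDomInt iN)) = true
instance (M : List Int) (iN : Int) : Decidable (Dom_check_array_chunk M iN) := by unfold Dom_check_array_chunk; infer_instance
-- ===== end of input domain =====

-- B checks the split by partitioning: filtering M for elements below / above the pivot must reproduce
-- exactly the left and right slices around iN (alternative formulation, same cost).

-- ===== PORT A =====
-- the loop 'for i in range(0, len(M))' with its two early returns; M[i]/M[iN] are in range here, so pyGet?.getD 0 is exact
def chunkLoop (M : List Int) (iN : Int) : List Int → Bool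
  | [] => true
  | i :: rest =>
    if i < iN ∧ (PySem.List.pyGet? M i).getD 0 ≥ (PySem.List.pyGet? M iN).getD 0 then false
    else if i > iN ∧ (PySem.List.pyGet? M i).getD 0 ≤ (PySem.List.pyGet? M iN).getD 0 then false
    else chunkLoop M iN rest

def check_array_chunk (M : List Int) (iN : Int) : Bool :=
  if M.length = 0 then decide (iN = 0)
  else if iN < 0 ∨ iN ≥ (M.length : Int) then false
  else chunkLoop M iN (PySem.List.pyRange 0 (M.length : Int) 1)

-- ===== PORT B =====
-- the two comprehensions become List.filter; the slices M[:iN], M[iN+1:] become PySem.List.slice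
def check_array_chunk_alt (M : List Int) (iN : Int) : Bool :=
  if M.length = 0 then decide (iN = 0)
  else if iN < 0 ∨ iN ≥ (M.length : Int) then false
  else
    let p := (PySem.List.pyGet? M iN).getD 0
    decide (M.filter (fun x => decide (x < p)) = PySem.List.slice M none (some iN) ∧
            M.filter (fun x => decide (x > p)) = PySem.List.slice M (some (iN + 1)) none)

-- ===== PRECONDITION & SPEC =====
def Spec_check_array_chunk (M : List Int) (iN : Int) (out : Bool) : Prop := out = check_array_chunk_alt M iN
instance (M : List Int) (iN : Int) (out : Bool) : Decidable (Spec_check_array_chunk M iN out) := by unfold Spec_check_array_chunk; infer_instance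

-- ===== CLAIM (what is proved, stated in full; the proofs are below) =====
def Claim_equal_check_array_chunk : Prop := ∀ (M : List Int) (iN : Int), Dom_check_array_chunk M iN → Spec_check_array_chunk M iN (check_array_chunk M iN)

-- ===== LEMMAS AND PROOFS =====

theorem chunkLoop_true_iff (M : List Int) (iN : Int) (L : List Int) :
    chunkLoop M iN L = true ↔ ∀ i ∈ L,
      ¬(i < iN ∧ (PySem.List.pyGet? M i).getD 0 ≥ (PySem.List.pyGet? M iN).getD 0) ∧
      ¬(i > iN ∧ (PySem.List.pyGet? M i).getD 0 ≤ (PySem.List.pyGet? M iN).getD 0) := by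
  induction L with
  | nil => simp [chunkLoop]
  | cons i rest ih =>
    simp only [chunkLoop, List.mem_cons]
    split_ifs with h1 h2
    · exact iff_of_false (by simp) (fun h => (h i (Or.inl rfl)).1 h1)
    · exact iff_of_false (by simp) (fun h => (h i (Or.inl rfl)).2 h2)
    · rw [ih]
      constructor
      · rintro h j (rfl | hj)
        · exact ⟨h1, h2⟩
        · exact h j hj
      · exact fun h j hj => h j (Or.inr hj)

-- the partition characterisation: the two filter equalities hold iff every left element is < p and
-- every right element is > p, where p = M[k]
theorem filter_split_iff (M : List Int) (k : Nat) (p : Int) (hk : k < M.length)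
    (hp : M[k] = p) :
    (M.filter (fun x => decide (x < p)) = M.take k ∧
     M.filter (fun x => decide (p < x)) = M.drop (k + 1)) ↔
    ((∀ i, (h : i < M.length) → i < k → M[i] < p) ∧
     (∀ i, (h : i < M.length) → k < i → p < M[i])) := by
  constructor
  · rintro ⟨hlt, hgt⟩
    constructor
    · intro i hi hik
      have hmem : M[i] ∈ M.take k :=
        List.mem_take_iff_getElem.mpr ⟨i, by omega, by simp⟩
      rw [← hlt] at hmem
      simpa using (List.of_mem_filter hmem)
    · intro i hi hki
      have hmem : M[i] ∈ M.drop (k + 1) :=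
        List.mem_drop_iff_getElem.mpr ⟨i - (k + 1), by omega, by congr 1; omega⟩
      rw [← hgt] at hmem
      simpa using (List.of_mem_filter hmem)
  · rintro ⟨hl, hr⟩
    have hdecomp : M = M.take k ++ p :: M.drop (k + 1) := by
      conv_lhs => rw [← List.take_append_drop k M]
      rw [List.drop_eq_getElem_cons hk, hp]
    have hlt_take : ∀ x ∈ M.take k, x < p := by
      intro x hx
      obtain ⟨i, hi, rfl⟩ := List.mem_take_iff_getElem.mp hx
      exact hl i (by omega) (by omega)
    have hgt_drop : ∀ x ∈ M.drop (k + 1), p < x := by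
      intro x hx
      obtain ⟨j, hj, rfl⟩ := List.mem_drop_iff_getElem.mp hx
      exact hr (k + 1 + j) (by omega) (by omega)
    constructor
    · conv_lhs => rw [hdecomp]
      rw [List.filter_append, List.filter_cons]
      rw [List.filter_eq_self.mpr (fun x hx => by simpa using hlt_take x hx),
          List.filter_eq_nil_iff.mpr (fun x hx => by simpa using not_lt.mpr (le_of_lt (hgt_drop x hx)))]
      simp
    · conv_lhs => rw [hdecomp]
      rw [List.filter_append, List.filter_cons]
      rw [List.filter_eq_nil_iff.mpr (fun x hx => by simpa using not_lt.mpr (le_of_lt (hlt_take x hx))),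
          List.filter_eq_self.mpr (fun x hx => by simpa using hgt_drop x hx)]
      simp

theorem check_array_chunk_spec : Claim_equal_check_array_chunk := by
  unfold Claim_equal_check_array_chunk
  intro M iN _
  unfold Spec_check_array_chunk check_array_chunk check_array_chunk_alt
  by_cases hlen : M.length = 0
  · simp [hlen]
  · simp only [hlen, if_false]
    by_cases hr : iN < 0 ∨ iN ≥ (M.length : Int)
    · simp [hr]
    · simp only [hr, if_false]
      push Not at hr
      obtain ⟨h0, hlt⟩ := hr
      obtain ⟨k, rfl⟩ : ∃ k : Nat, iN = (k : Int) := ⟨iN.toNat, (Int.toNat_of_nonneg h0).symm⟩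
      have hk : k < M.length := by exact_mod_cast hlt
      have hget : (PySem.List.pyGet? M (k : Int)).getD 0 = M[k] := by
        rw [PySem.List.pyGet?_natCast, List.getElem?_eq_getElem hk]; rfl
      have hslice1 : PySem.List.slice M none (some (k : Int)) = M.take k :=
        PySem.List.slice_to_natCast M k
      have hslice2 : PySem.List.slice M (some ((k : Int) + 1)) none = M.drop (k + 1) := by
        have : ((k : Int) + 1) = ((k + 1 : Nat) : Int) := by push_cast; ring
        rw [this, PySem.List.slice_from_natCast M (k + 1)]
      rw [Bool.eq_iff_iff, chunkLoop_true_iff]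
      simp only [hget, hslice1, hslice2, decide_eq_true_eq]
      rw [filter_split_iff M k M[k] hk rfl]
      constructor
      · intro h
        constructor
        · intro i hi hik
          have := (h (i : Int) (by
            rw [PySem.List.mem_pyRange_one]
            exact ⟨Int.natCast_nonneg i, by exact_mod_cast hi⟩)).1
          rw [PySem.List.pyGet?_natCast, List.getElem?_eq_getElem hi] at this
          simp only [Option.getD_some] at this
          by_contra hcon
          exact this ⟨by exact_mod_cast hik, by omega⟩
        · intro i hi hki
          have := (h (i : Int) (by
            rw [PySem.List.mem_pyRange_one]
            exact ⟨Int.natCast_nonneg i, by exact_mod_cast hi⟩)).2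
          rw [PySem.List.pyGet?_natCast, List.getElem?_eq_getElem hi] at this
          simp only [Option.getD_some] at this
          by_contra hcon
          exact this ⟨by exact_mod_cast hki, by omega⟩
      · rintro ⟨hl, hrr⟩ i hi
        rw [PySem.List.mem_pyRange_one] at hi
        obtain ⟨hi0, hin⟩ := hi
        obtain ⟨j, rfl⟩ : ∃ j : Nat, i = (j : Int) := ⟨i.toNat, (Int.toNat_of_nonneg hi0).symm⟩
        have hjL : j < M.length := by exact_mod_cast hin
        rw [PySem.List.pyGet?_natCast, List.getElem?_eq_getElem hjL]
        simp only [Option.getD_some]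
        constructor
        · rintro ⟨hjk, hge⟩
          exact absurd (hl j hjL (by exact_mod_cast hjk)) (by omega)
        · rintro ⟨hjk, hle⟩
          exact absurd (hrr j hjL (by exact_mod_cast hjk)) (by omega)
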